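-- pv_equiv track=rewrite | github.com/TEX479/QED | QED_system.py | _key_intlist2int
-- ===== SOURCE A (Python) =====
-- def _key_intlist2int(key:list[int]) -> int:
--     value:int = 0
--     bit2append:int = 1
--     for element in key:
--         value = value << element
--         if bit2append == 1:
--             value = value + (1 << element) - 1
--             bit2append = 0
--         else:
--             bit2append = 1
--     return value
-- ===== SOURCE B (Python) =====
-- def _key_intlist2int(key:list[int]) -> int:
--     # Back-to-front: add each even-index group's block of ones at its final
--     # bit offset, tracking the offset as a running sum; no accumulator shifting.
--     value: int = 0
--     shift: int = 0
--     n = len(key)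
--     for j, element in enumerate(reversed(key)):
--         if j % 2 == (n - 1) % 2:
--             value += ((1 << element) - 1) << shift
--         shift += element
--     return value
-- ===== Notes on version B (the rewrite author's own statement) =====
-- stated objective: alternative
-- what changed: A shifts a single accumulator left at every element and toggles a bit2append flag; B traverses the list in reverse once, tracking the running bit offset as a sum and adding each even-index group's block of ones at its final position, with the ones/zeros role decided by enumerate parity instead of a mutated flag.
import Mathlib
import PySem

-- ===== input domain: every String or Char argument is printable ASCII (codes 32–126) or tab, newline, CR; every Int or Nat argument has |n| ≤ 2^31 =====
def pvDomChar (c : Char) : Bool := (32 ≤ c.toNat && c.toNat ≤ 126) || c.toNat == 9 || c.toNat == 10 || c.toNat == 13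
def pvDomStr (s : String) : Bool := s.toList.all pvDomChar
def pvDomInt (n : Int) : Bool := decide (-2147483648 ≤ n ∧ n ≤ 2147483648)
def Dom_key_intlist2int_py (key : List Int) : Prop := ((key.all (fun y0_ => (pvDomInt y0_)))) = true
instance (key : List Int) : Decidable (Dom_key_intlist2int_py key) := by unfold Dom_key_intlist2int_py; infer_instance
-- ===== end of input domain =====

-- B replaces A's left-to-right accumulator shifting + toggle flag by a single reverse pass
-- that adds each even-index block of ones at its final offset (a running shift sum); same
-- values on all lists of nonnegative ints (Pre_); objective: alternative decomposition.

-- ===== PORT A =====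
-- value << element ported as value <<< element.toNat: exact for 0 ≤ element (Pre_);
-- Python raises ValueError on a negative shift count, excluded by Pre_.
def pvStepA (s : Int × Int) (element : Int) : Int × Int :=
  let value := s.1 <<< element.toNat
  if s.2 == 1 then (value + ((1 : Int) <<< element.toNat) - 1, 0)
  else (value, 1)

def key_intlist2int_py (key : List Int) : Int :=
  (key.foldl pvStepA (0, 1)).1

-- ===== PORT B =====
-- shifts ported via .toNat as in A, exact under Pre_ (all elements ≥ 0, hence shift ≥ 0).
def pvStepB (n : Int) (s : Int × Int) (p : Int × Int) : Int × Int :=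
  let value :=
    if PySem.Int.mod p.1 2 == PySem.Int.mod (n - 1) 2 then
      s.1 + (((1 : Int) <<< p.2.toNat) - 1) <<< s.2.toNat
    else s.1
  (value, s.2 + p.2)

def key_intlist2int_py_alt (key : List Int) : Int :=
  let n : Int := PySem.List.len key
  ((PySem.List.enumerate key.reverse).foldl (pvStepB n) (0, 0)).1

-- ===== PRECONDITION & SPEC =====
-- Pre_: every element nonnegative — Python A raises ValueError ("negative shift count")
-- on any list containing a negative element.
def Pre_key_intlist2int_py (key : List Int) : Prop := ∀ e ∈ key, 0 ≤ e
instance (key : List Int) : Decidable (Pre_key_intlist2int_py key) := by unfold Pre_key_intlist2int_py; infer_instance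
def pvWitness_key_intlist2int_py : List Int := [2, 1, 3, 0, 2]

def Spec_key_intlist2int_py (key : List Int) (out : Int) : Prop := out = key_intlist2int_py_alt key
instance (key : List Int) (out : Int) : Decidable (Spec_key_intlist2int_py key out) := by unfold Spec_key_intlist2int_py; infer_instance

-- ===== CLAIM (what is proved, stated in full; the proofs are below) =====
def Claim_equal_key_intlist2int_py : Prop := ∀ (key : List Int), Dom_key_intlist2int_py key → Pre_key_intlist2int_py key → Spec_key_intlist2int_py key (key_intlist2int_py key)

-- ===== LEMMAS AND PROOFS =====

/-- Total number of bits emitted by the elements (clamped at 0). -/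
def pvS (xs : List Int) : Nat := (xs.map Int.toNat).sum

/-- Left-to-right reference value: flag `b` tells whether the head element emits ones. -/
def pvW : Bool → List Int → Int
  | _, [] => 0
  | true, e :: ys => ((2 : Int) ^ e.toNat - 1) * 2 ^ pvS ys + pvW false ys
  | false, _ :: ys => pvW true ys

/-- Right-anchored reference value matching B's parity test against `n - 1`. -/
def pvV (n : Int) : List Int → Int
  | [] => 0
  | e :: ys =>
    if PySem.Int.mod (ys.length : Int) 2 == PySem.Int.mod (n - 1) 2 then
      ((2 : Int) ^ e.toNat - 1) * 2 ^ pvS ys + pvV n ys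
    else pvV n ys

theorem pvStepA_one (v e : Int) :
    pvStepA (v, 1) e = (v * 2 ^ e.toNat + ((2 : Int) ^ e.toNat - 1), 0) := by
  simp [pvStepA, Int.shiftLeft_eq]; ring

theorem pvStepA_zero (v e : Int) :
    pvStepA (v, 0) e = (v * 2 ^ e.toNat, 1) := by
  simp [pvStepA, Int.shiftLeft_eq]

theorem pvA_fold (xs : List Int) (v : Int) (b : Bool) :
    xs.foldl pvStepA (v, if b then 1 else 0)
    = (v * 2 ^ pvS xs + pvW b xs, if b ^^ (xs.length % 2 == 1) then (1 : Int) else 0) := by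
  induction xs generalizing v b with
  | nil => cases b <;> simp [pvS, pvW]
  | cons e ys ih =>
    cases b with
    | true =>
      rw [List.foldl_cons, show (if true then (1:Int) else 0) = 1 from rfl, pvStepA_one,
        show ((0:Int)) = (if false then (1:Int) else 0) from rfl, ih]
      simp only [Prod.mk.injEq]
      refine ⟨?_, ?_⟩
      · simp [pvW, pvS, pow_add]; ring
      · rcases Nat.mod_two_eq_zero_or_one ys.length with h2 | h2 <;>
          simp [Nat.add_mod, h2]
    | false =>
      rw [List.foldl_cons, show (if false then (1:Int) else 0) = 0 from rfl, pvStepA_zero,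
        show ((1:Int)) = (if true then (1:Int) else 0) from rfl, ih]
      simp only [Prod.mk.injEq]
      refine ⟨?_, ?_⟩
      · simp [pvW, pvS, pow_add]; ring
      · rcases Nat.mod_two_eq_zero_or_one ys.length with h2 | h2 <;>
          simp [Nat.add_mod, h2]

theorem pvMod_flip (k : Int) :
    PySem.Int.mod (k + 1) 2 = if PySem.Int.mod k 2 = 0 then 1 else 0 := by
  have h0 := PySem.Int.mod_nonneg (k + 1) (by norm_num : (0:Int) < 2)
  have h1 := PySem.Int.mod_lt (k + 1) (by norm_num : (0:Int) < 2)
  have h2 := PySem.Int.mod_nonneg k (by norm_num : (0:Int) < 2)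
  have h3 := PySem.Int.mod_lt k (by norm_num : (0:Int) < 2)
  have e1 := PySem.Int.floordiv_mul_add_mod (k + 1) 2
  have e2 := PySem.Int.floordiv_mul_add_mod k 2
  split_ifs with h <;> omega

theorem pvB_fold (n : Int) (xs : List Int) (hx : ∀ e ∈ xs, 0 ≤ e) :
    (PySem.List.enumerate xs.reverse).foldl (pvStepB n) (0, 0)
    = (pvV n xs, ((pvS xs : Nat) : Int)) := by
  induction xs with
  | nil => simp [PySem.List.enumerate_nil, pvV, pvS]
  | cons e ys ih =>
    have hys : ∀ x ∈ ys, 0 ≤ x := fun x hm => hx x (List.mem_cons_of_mem _ hm)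
    have he : (0:Int) ≤ e := hx e List.mem_cons_self
    rw [List.reverse_cons, PySem.List.enumerate_append, List.foldl_append, ih hys]
    simp only [PySem.List.enumerate_cons, PySem.List.enumerate_nil, List.length_reverse,
      List.foldl_cons, List.foldl_nil, pvStepB, Int.shiftLeft_eq, zero_add]
    have hsh : ((pvS ys : Int)).toNat = pvS ys := by simp
    simp only [Prod.mk.injEq]
    refine ⟨?_, ?_⟩
    · simp only [pvV, hsh]
      split <;> simp [mul_comm, add_comm]
    · simp only [pvS, List.map_cons, List.sum_cons]
      push_cast
      omega

theorem pvV_eq_pvW (n : Int) (xs : List Int) :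
    pvV n xs = pvW (PySem.Int.mod (xs.length : Int) 2 == PySem.Int.mod n 2) xs := by
  induction xs with
  | nil => simp [pvV, pvW]
  | cons e ys ih =>
    have hy0 := PySem.Int.mod_nonneg (ys.length : Int) (by norm_num : (0:Int) < 2)
    have hy1 := PySem.Int.mod_lt (ys.length : Int) (by norm_num : (0:Int) < 2)
    have hn0 := PySem.Int.mod_nonneg (n - 1) (by norm_num : (0:Int) < 2)
    have hn1 := PySem.Int.mod_lt (n - 1) (by norm_num : (0:Int) < 2)
    have hflip1 : PySem.Int.mod ((ys.length : Int) + 1) 2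
        = if PySem.Int.mod (ys.length : Int) 2 = 0 then 1 else 0 := pvMod_flip _
    have hflip2 : PySem.Int.mod n 2
        = if PySem.Int.mod (n - 1) 2 = 0 then 1 else 0 := by
      have := pvMod_flip (n - 1); simpa using this
    have hcast : (((ys.length + 1 : Nat)) : Int) = (ys.length : Int) + 1 := by push_cast; ring
    simp only [pvV, List.length_cons]
    by_cases h : PySem.Int.mod (ys.length : Int) 2 = PySem.Int.mod (n - 1) 2
    · rw [if_pos (beq_iff_eq.mpr h)]
      have hcons : (PySem.Int.mod (((ys.length + 1 : Nat)) : Int) 2 == PySem.Int.mod n 2) = true := by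
        rw [hcast, hflip1, hflip2, h]
        simp
      have hsub : (PySem.Int.mod (ys.length : Int) 2 == PySem.Int.mod n 2) = false := by
        rw [hflip2]
        apply beq_eq_false_iff_ne.mpr
        split_ifs with h0 <;> omega
      rw [hcons, ih, hsub]
      rfl
    · rw [if_neg (fun hb => h (beq_iff_eq.mp hb))]
      have hcons : (PySem.Int.mod (((ys.length + 1 : Nat)) : Int) 2 == PySem.Int.mod n 2) = false := by
        rw [hcast, hflip1, hflip2]
        apply beq_eq_false_iff_ne.mpr
        split_ifs with h0 h1 <;> omega
      have hsub : (PySem.Int.mod (ys.length : Int) 2 == PySem.Int.mod n 2) = true := by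
        rw [hflip2]
        apply beq_iff_eq.mpr
        split_ifs with h0 <;> omega
      rw [hcons, ih, hsub]
      rfl

-- ===== VERDICT (by name: the statement is the Claim_ definition above) =====
theorem key_intlist2int_py_spec : Claim_equal_key_intlist2int_py := by
  intro key _ hpre
  unfold Spec_key_intlist2int_py key_intlist2int_py key_intlist2int_py_alt
  show (List.foldl pvStepA (0, 1) key).1
      = ((PySem.List.enumerate key.reverse).foldl (pvStepB (PySem.List.len key)) (0, 0)).1
  rw [pvB_fold (PySem.List.len key) key hpre]
  have hA := pvA_fold key 0 true
  rw [show (if true then (1:Int) else 0) = 1 from rfl] at hA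
  rw [hA]
  simp only [zero_mul, zero_add]
  rw [pvV_eq_pvW]
  simp [PySem.List.len_eq]
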